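-- pv_equiv track=rewrite | github.com/pynenc/pynenc | pynenc/util/redis_keys.py | sanitize_for_redis
-- ===== SOURCE A (Python) =====
-- def sanitize_for_redis(s: str) -> str:
--     """
--     Sanitizes a string for use as a Redis key.
--
--     :param str s: The string to sanitize.
--     :return: The sanitized string.
--     """
--     if s is None:
--         return ""
--     replacements = {
--         "[": "__OPEN_BRACKET__",
--         "]": "__CLOSE_BRACKET__",
--         "*": "__ASTERISK__",
--     }
--     for k, v in replacements.items():
--         s = s.replace(k, v)
--     return s
-- ===== SOURCE B (Python) =====
-- def sanitize_for_redis(s: str) -> str: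
--     if s is None:
--         return ""
--     table = {
--         "[": "__OPEN_BRACKET__",
--         "]": "__CLOSE_BRACKET__",
--         "*": "__ASTERISK__",
--     }
--     return "".join(table.get(c, c) for c in s)
-- ===== Notes on version B (the rewrite author's own statement) =====
-- stated objective: alternative
-- what changed: Replaces three sequential full-string .replace passes (one per special character) with a single character-by-character pass over s driven by a lookup table, joining the mapped pieces once.
import Mathlib
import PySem

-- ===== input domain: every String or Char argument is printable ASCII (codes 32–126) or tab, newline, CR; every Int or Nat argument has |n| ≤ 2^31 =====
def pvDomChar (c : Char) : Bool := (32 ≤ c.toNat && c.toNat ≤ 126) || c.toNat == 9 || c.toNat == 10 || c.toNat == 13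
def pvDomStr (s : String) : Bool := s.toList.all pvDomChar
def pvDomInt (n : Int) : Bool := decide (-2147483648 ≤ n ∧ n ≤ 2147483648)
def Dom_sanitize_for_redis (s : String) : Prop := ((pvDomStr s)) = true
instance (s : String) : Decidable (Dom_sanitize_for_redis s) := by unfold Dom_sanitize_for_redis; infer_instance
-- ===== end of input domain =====

-- B replaces A's three sequential full-string .replace passes with one table-driven
-- character-by-character pass (objective: alternative/idiomatic single pass).
-- The Python `if s is None` guard is unreachable for a str argument and is not modelled.

-- ===== PORT A =====
-- three sequential replace passes, in dict insertion order
def sanitize_for_redis (s : String) : String :=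
  let s := PySem.Str.replace s "[" "__OPEN_BRACKET__"
  let s := PySem.Str.replace s "]" "__CLOSE_BRACKET__"
  let s := PySem.Str.replace s "*" "__ASTERISK__"
  s

-- ===== PORT B =====
-- ''.join(table.get(c, c) for c in s): one pass over the characters
def sanitize_for_redis_alt (s : String) : String :=
  let table : PySem.Dict Char String := PySem.Dict.ofList
    [('[', "__OPEN_BRACKET__"), (']', "__CLOSE_BRACKET__"), ('*', "__ASTERISK__")]
  PySem.Str.join "" (s.toList.map (fun c => PySem.Dict.getD table c (String.ofList [c])))

-- ===== PRECONDITION & SPEC =====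
def Spec_sanitize_for_redis (s : String) (out : String) : Prop := out = sanitize_for_redis_alt s
instance (s : String) (out : String) : Decidable (Spec_sanitize_for_redis s out) := by unfold Spec_sanitize_for_redis; infer_instance

-- ===== CLAIM (what is proved, stated in full; the proofs are below) =====
def Claim_equal_sanitize_for_redis : Prop := ∀ (s : String), Dom_sanitize_for_redis s → Spec_sanitize_for_redis s (sanitize_for_redis s)

-- ===== LEMMAS AND PROOFS =====

-- replace with a single-character pattern is a flatMap over the characters
theorem replace_go_single (k : Char) (new : List Char) :
    ∀ (fuel : Nat) (l acc : List Char), l.length ≤ fuel →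
      PySem.Chars.replace.go [k] new fuel l acc
        = acc.reverse ++ l.flatMap (fun c => if c = k then new else [c]) := by
  intro fuel
  induction fuel with
  | zero =>
    intro l acc h
    cases l with
    | nil => simp [PySem.Chars.replace.go]
    | cons c t => simp at h
  | succ n ih =>
    intro l acc h
    cases l with
    | nil => simp [PySem.Chars.replace.go]
    | cons c t =>
      simp only [PySem.Chars.replace.go]
      by_cases hc : c = k
      · subst hc
        simp only [List.isPrefixOf, BEq.rfl, Bool.true_and, if_true]
        rw [ih] <;> simp_all
      · have : List.isPrefixOf [k] (c :: t) = false := by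
          simp [List.isPrefixOf]; exact fun h => absurd h.symm hc
        rw [this]
        simp only [Bool.false_eq_true, if_false]
        rw [ih t (c :: acc) (by simpa using Nat.le_of_succ_le_succ h)]
        simp [hc]

theorem replace_single (k : Char) (new cs : List Char) :
    PySem.Chars.replace cs [k] new = cs.flatMap (fun c => if c = k then new else [c]) := by
  rw [PySem.Chars.replace]
  simp only [List.isEmpty_cons, Bool.false_eq_true, if_false]
  exact replace_go_single k new cs.length cs [] le_rfl

-- ''.join of pieces is their concatenation
theorem join_empty_sep (parts : List (List Char)) :
    PySem.Chars.join [] parts = parts.flatten := by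
  induction parts with
  | nil => simp [PySem.Chars.join, List.intercalate]
  | cons p ps ih =>
    cases ps with
    | nil => simp [PySem.Chars.join, List.intercalate]
    | cons q qs =>
      simp only [PySem.Chars.join, List.intercalate] at *
      simp [List.intersperse] at *
      simpa using ih

theorem sanitize_toList (s : String) :
    (sanitize_for_redis s).toList = (sanitize_for_redis_alt s).toList := by
  simp only [sanitize_for_redis, sanitize_for_redis_alt, PySem.Str.replace,
    PySem.Str.toList_join, String.toList_ofList]
  rw [show ("" : String).toList = [] from rfl, join_empty_sep]
  rw [show ("[" : String).toList = ['['] from rfl,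
    show ("]" : String).toList = [']'] from rfl,
    show ("*" : String).toList = ['*'] from rfl]
  rw [replace_single, replace_single, replace_single]
  rw [List.flatMap_assoc, List.flatMap_assoc]
  rw [List.map_map, ← List.flatMap_def]
  refine List.flatMap_congr ?_
  intro c _
  by_cases h1 : c = '[' <;> by_cases h2 : c = ']' <;> by_cases h3 : c = '*' <;>
    subst_vars <;>
    simp_all [PySem.Dict.getD, PySem.Dict.get?, PySem.Dict.ofList, PySem.Dict.insert, PySem.Dict.update, PySem.Dict.empty, List.find?] <;>
    (try simp [beq_eq_false_iff_ne.mpr (Ne.symm h1), beq_eq_false_iff_ne.mpr (Ne.symm h2), beq_eq_false_iff_ne.mpr (Ne.symm h3), String.toList_ofList])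

-- ===== VERDICT (by name: the statement is the Claim_ definition above) =====
theorem sanitize_for_redis_spec : Claim_equal_sanitize_for_redis := by
  intro s _
  unfold Spec_sanitize_for_redis
  have := sanitize_toList s
  exact String.toList_injective this
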